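-- pv_equiv track=rewrite | github.com/constarik/Noisore | noisore_sim.py | pick_light
-- ===== SOURCE A (Python) =====
-- def pick_light(grid, drop_power, rows, cols):
--     best, best_sum = 0, float('inf')
--     for c in range(cols):
--         s = sum(grid[r][c] for r in range(rows))
--         if s < best_sum:
--             best_sum = s
--             best = c
--     return best
-- ===== SOURCE B (Python) =====
-- def pick_light(grid, drop_power, rows, cols):
--     if cols <= 0:
--         return 0
--     sums = [0] * cols
--     for r in range(rows):
--         row = grid[r]
--         for c in range(cols):
--             sums[c] += row[c]
--     return sums.index(min(sums))
-- ===== Notes on version B (the rewrite author's own statement) =====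
-- stated objective: faster
-- what changed: Replaces A's per-column recomputation (a generator indexing grid[r][c] for every column) with one row-major accumulation pass into a sums table followed by sums.index(min(sums)) for the leftmost minimum column.
import Mathlib
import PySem

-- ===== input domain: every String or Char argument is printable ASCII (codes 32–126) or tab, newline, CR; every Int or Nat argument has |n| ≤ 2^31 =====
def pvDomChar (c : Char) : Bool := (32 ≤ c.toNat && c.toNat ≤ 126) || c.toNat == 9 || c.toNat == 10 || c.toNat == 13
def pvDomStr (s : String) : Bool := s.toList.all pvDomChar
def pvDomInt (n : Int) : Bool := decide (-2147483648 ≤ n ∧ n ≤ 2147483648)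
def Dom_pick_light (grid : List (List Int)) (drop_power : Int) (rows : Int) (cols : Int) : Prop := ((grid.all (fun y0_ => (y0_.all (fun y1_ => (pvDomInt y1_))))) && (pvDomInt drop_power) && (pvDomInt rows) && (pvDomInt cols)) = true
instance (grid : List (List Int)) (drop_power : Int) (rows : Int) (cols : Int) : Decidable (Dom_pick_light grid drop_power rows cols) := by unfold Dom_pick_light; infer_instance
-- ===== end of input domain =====

-- B replaces A's per-column recomputation with one row-major accumulation pass into a
-- sums table followed by index(min(sums)); objective: faster (constant factor).

-- ===== PORT A =====
-- s = sum(grid[r][c] for r in range(rows))  (named helper for A's inner generator sum)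
def pickLightColSum (grid : List (List Int)) (rows : Int) (c : Int) : Int :=
  (PySem.List.pyRange 0 rows 1).foldl
    (fun acc r => acc + PySem.List.pyGetD (PySem.List.pyGetD grid r []) c 0) 0

def pick_light (grid : List (List Int)) (drop_power : Int) (rows : Int) (cols : Int) : Int :=
  ((PySem.List.pyRange 0 cols 1).foldl
    (fun (st : Int × Option Int) (c : Int) =>
      let s := pickLightColSum grid rows c
      match st.2 with
      | none => (c, some s)              -- s < inf: the first column always updates
      | some m => if s < m then (c, some s) else st)
    (0, none)).1

-- ===== PORT B =====
def pick_light_alt (grid : List (List Int)) (drop_power : Int) (rows : Int) (cols : Int) : Int :=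
  if cols ≤ 0 then 0
  else
    let sums :=
      (PySem.List.pyRange 0 rows 1).foldl
        (fun (sums : List Int) (r : Int) =>
          let row := PySem.List.pyGetD grid r []
          (PySem.List.pyRange 0 cols 1).foldl
            (fun sums c =>
              PySem.List.pySetD sums c (PySem.List.pyGetD sums c 0 + PySem.List.pyGetD row c 0))
            sums)
        (List.replicate cols.toNat 0)
    match PySem.List.min? sums (fun y => y) with
    | none => 0
    | some m => ((PySem.List.index? sums m).getD 0 : Nat)

-- ===== PRECONDITION & SPEC =====
-- Pre_ excludes exactly the inputs where Python A raises IndexError: a positive rows/cols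
-- pair that reaches a row index ≥ len(grid) or a column index ≥ len(grid[r]).
def Pre_pick_light (grid : List (List Int)) (drop_power : Int) (rows : Int) (cols : Int) : Prop :=
  cols ≤ 0 ∨ rows ≤ 0 ∨
    (rows ≤ (grid.length : Int) ∧ ∀ row ∈ grid.take rows.toNat, cols ≤ (row.length : Int))
instance (grid : List (List Int)) (drop_power : Int) (rows : Int) (cols : Int) : Decidable (Pre_pick_light grid drop_power rows cols) := by unfold Pre_pick_light; infer_instance

def pvWitness_pick_light : List (List Int) × Int × Int × Int := ([[1, 2], [3, 0]], 0, 2, 2)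

def Spec_pick_light (grid : List (List Int)) (drop_power : Int) (rows : Int) (cols : Int) (out : Int) : Prop := out = pick_light_alt grid drop_power rows cols
instance (grid : List (List Int)) (drop_power : Int) (rows : Int) (cols : Int) (out : Int) : Decidable (Spec_pick_light grid drop_power rows cols out) := by unfold Spec_pick_light; infer_instance

-- ===== CLAIM (what is proved, stated in full; the proofs are below) =====
def Claim_equal_pick_light : Prop := ∀ (grid : List (List Int)) (drop_power : Int) (rows : Int) (cols : Int), Dom_pick_light grid drop_power rows cols → Pre_pick_light grid drop_power rows cols → Spec_pick_light grid drop_power rows cols (pick_light grid drop_power rows cols)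

-- ===== LEMMAS AND PROOFS =====

-- "first strict improver chain": fm L m = some (j, v) means that scanning L with current
-- best value m, the final best is v at offset j in L; none means no element of L is < m.
def fm : List Int → Int → Option (Int × Int)
  | [], _ => none
  | x :: t, m =>
    if x < m then
      some (match fm t x with
            | none => (0, x)
            | some jv => (jv.1 + 1, jv.2))
    else (fm t m).map (fun jv => (jv.1 + 1, jv.2))

-- A's Option-state fold reduces to a plain (best, best_sum) fold once best_sum is set
theorem afold_opt (f : Int → Int) :
    ∀ (cs : List Int) (b m : Int),
      cs.foldl
          (fun (st : Int × Option Int) (c : Int) =>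
            match st.2 with
            | none => (c, some (f c))
            | some mm => if f c < mm then (c, some (f c)) else st) (b, some m)
        = (let r := cs.foldl (fun (st : Int × Int) c => if f c < st.2 then (c, f c) else st) (b, m)
           (r.1, some r.2)) := by
  intro cs
  induction cs with
  | nil => intro b m; rfl
  | cons c t ih =>
    intro b m
    simp only [List.foldl_cons]
    by_cases h : f c < m
    · simpa [h] using ih c (f c)
    · simpa [h] using ih b m

-- A's plain fold over a range, characterised by fm on the mapped values
theorem afold_fm (f : Int → Int) :
    ∀ (n : Nat) (k b m : Int),
      (PySem.List.pyRange k (k + n) 1).foldl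
          (fun (st : Int × Int) c => if f c < st.2 then (c, f c) else st) (b, m)
        = match fm ((PySem.List.pyRange k (k + n) 1).map f) m with
          | none => (b, m)
          | some jv => (k + jv.1, jv.2) := by
  intro n
  induction n with
  | zero =>
    intro k b m
    rw [PySem.List.pyRange_one_eq_nil (by omega)]
    rfl
  | succ n ih =>
    intro k b m
    rw [(by push_cast; ring : ((n + 1 : Nat) : Int) = ((n : Nat) : Int) + 1),
        PySem.List.pyRange_one_cons (by omega : k < k + (((n : Nat) : Int) + 1)),
        (by ring : k + (((n : Nat) : Int) + 1) = (k + 1) + ((n : Nat) : Int))]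
    simp only [List.foldl_cons, List.map_cons]
    by_cases h : f k < m
    · rw [if_pos h, ih (k + 1) k (f k)]
      simp only [fm, if_pos h]
      rcases hfm : fm ((PySem.List.pyRange (k+1) (k+1+(n:Nat)) 1).map f) (f k) with _ | ⟨⟨j, v⟩⟩
      · simp
      · simp only []
        rw [Prod.mk.injEq]
        exact ⟨by ring, rfl⟩
    · rw [if_neg h, ih (k + 1) b m]
      simp only [fm, if_neg h]
      rcases hfm : fm ((PySem.List.pyRange (k+1) (k+1+(n:Nat)) 1).map f) m with _ | ⟨⟨j, v⟩⟩
      · simp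
      · simp only [Option.map_some]
        rw [Prod.mk.injEq]
        exact ⟨by ring, rfl⟩

-- B's selection (leftmost minimum via min and first index), characterised by fm
theorem index_min_fm :
    ∀ (t : List Int) (x0 : Int),
      (fm t x0 = none → t.foldl min x0 = x0) ∧
      (∀ j v, fm t x0 = some (j, v) →
        v = t.foldl min x0 ∧ v < x0 ∧ 0 ≤ j ∧ PySem.List.index? t v = some j.toNat) := by
  intro t
  induction t with
  | nil =>
    intro x0
    exact ⟨fun _ => rfl, fun j v h => by simp [fm] at h⟩
  | cons x t ih =>
    intro x0
    by_cases h : x < x0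
    · have hmin : min x0 x = x := by omega
      constructor
      · intro hn; simp [fm, h] at hn
      · intro j v hjv
        simp only [fm, if_pos h] at hjv
        rcases hfm : fm t x with _ | ⟨⟨j', v'⟩⟩
        · rw [hfm] at hjv
          have h1 := (ih x).1 hfm
          simp at hjv
          obtain ⟨rfl, rfl⟩ := hjv
          refine ⟨?_, h, le_refl 0, ?_⟩
          · simp [List.foldl_cons, hmin, h1]
          · exact PySem.List.index?_cons_self x t
        · rw [hfm] at hjv
          obtain ⟨hv', hlt', hj', hidx'⟩ := (ih x).2 j' v' hfm
          simp at hjv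
          obtain ⟨rfl, rfl⟩ := hjv
          refine ⟨by simp [List.foldl_cons, hmin, hv'], by omega, by omega, ?_⟩
          rw [PySem.List.index?_cons_of_ne t (by omega : x ≠ v'), hidx']
          simp only [Option.map_some]
          congr 1
          omega
    · have hmin : min x0 x = x0 := by omega
      constructor
      · intro hn
        simp only [fm, if_neg h, Option.map_eq_none_iff] at hn
        have h1 := (ih x0).1 hn
        simp [List.foldl_cons, hmin, h1]
      · intro j v hjv
        simp only [fm, if_neg h] at hjv
        rcases hfm : fm t x0 with _ | ⟨⟨j', v'⟩⟩
        · rw [hfm] at hjv; simp at hjv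
        · rw [hfm] at hjv
          obtain ⟨hv', hlt', hj', hidx'⟩ := (ih x0).2 j' v' hfm
          simp at hjv
          obtain ⟨rfl, rfl⟩ := hjv
          refine ⟨by simp [List.foldl_cons, hmin, hv'], by omega, by omega, ?_⟩
          rw [PySem.List.index?_cons_of_ne t (by omega : x ≠ v'), hidx']
          simp only [Option.map_some]
          congr 1
          omega

-- B's inner (per-row) fold, restricted to the first m slots of a range-map table
theorem inner_fold_gen (row : List Int) (f : Int → Int) (n : Nat) :
    ∀ (m : Nat), m ≤ n →
      (PySem.List.pyRange 0 (m : Int) 1).foldl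
          (fun sums c =>
            PySem.List.pySetD sums c (PySem.List.pyGetD sums c 0 + PySem.List.pyGetD row c 0))
          ((PySem.List.pyRange 0 (n : Int) 1).map f)
        = (PySem.List.pyRange 0 (n : Int) 1).map
            (fun c => if c < (m : Int) then f c + PySem.List.pyGetD row c 0 else f c) := by
  intro m
  induction m with
  | zero =>
    intro _
    simp only [Nat.cast_zero]
    rw [PySem.List.pyRange_one_eq_nil (a := 0) (b := 0) (le_refl 0)]
    simp only [List.foldl_nil]
    refine (List.map_congr_left ?_).symm
    intro c hc
    have := (PySem.List.mem_pyRange_one.1 hc).1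
    rw [if_neg (by omega)]
  | succ m ih =>
    intro hm
    rw [(by push_cast; ring : ((m + 1 : Nat) : Int) = (m : Int) + 1),
        PySem.List.pyRange_one_succ_right (by omega), List.foldl_append, ih (by omega)]
    simp only [List.foldl_cons, List.foldl_nil]
    have hmn : (m : Int) < (n : Int) := by exact_mod_cast hm
    rw [PySem.List.pyGetD_map_pyRange_of_nonneg _ _ _ _ (by omega) hmn,
        if_neg (by omega), PySem.List.pySetD_natCast]
    apply List.ext_getElem
    · simp
    · intro i h1 h2
      rw [List.getElem_set]
      simp only [List.getElem_map, PySem.List.getElem_pyRange_one]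
      split_ifs with hEq <;>
        first
          | rfl
          | omega
          | (subst hEq; simp)

-- B's inner (per-row) fold updates every slot of a range-map table
theorem inner_fold_eq (row : List Int) (f : Int → Int) (N : Int) :
    (PySem.List.pyRange 0 N 1).foldl
        (fun sums c =>
          PySem.List.pySetD sums c (PySem.List.pyGetD sums c 0 + PySem.List.pyGetD row c 0))
        ((PySem.List.pyRange 0 N 1).map f)
      = (PySem.List.pyRange 0 N 1).map (fun c => f c + PySem.List.pyGetD row c 0) := by
  by_cases h : N ≤ 0
  · rw [PySem.List.pyRange_one_eq_nil (a := 0) (b := N) h]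
    rfl
  · have hN : ((N.toNat : Nat) : Int) = N := Int.toNat_of_nonneg (by omega)
    rw [← hN, inner_fold_gen row f N.toNat N.toNat le_rfl]
    apply List.map_congr_left
    intro c hc
    have := PySem.List.mem_pyRange_one.1 hc
    rw [if_pos (by omega)]

-- B's accumulated table over the first m rows is the table of A's column sums
theorem outer_gen (grid : List (List Int)) (cols : Int) :
    ∀ (m : Nat),
      (PySem.List.pyRange 0 (m : Int) 1).foldl
          (fun (sums : List Int) (r : Int) =>
            let row := PySem.List.pyGetD grid r []
            (PySem.List.pyRange 0 cols 1).foldl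
              (fun sums c =>
                PySem.List.pySetD sums c
                  (PySem.List.pyGetD sums c 0 + PySem.List.pyGetD row c 0))
              sums)
          (List.replicate cols.toNat 0)
        = (PySem.List.pyRange 0 cols 1).map (fun c => pickLightColSum grid (m : Int) c) := by
  intro m
  induction m with
  | zero =>
    simp only [Nat.cast_zero]
    rw [PySem.List.pyRange_one_eq_nil (a := 0) (b := 0) (le_refl 0)]
    simp only [List.foldl_nil]
    rw [show (fun c => pickLightColSum grid 0 c) = (fun _ : Int => (0 : Int)) from
          funext fun c => by
            unfold pickLightColSum
            rw [PySem.List.pyRange_one_eq_nil (a := 0) (b := 0) (le_refl 0)]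
            rfl,
        List.map_const']
    simp [PySem.List.length_pyRange_one]
  | succ m ih =>
    rw [(by push_cast; ring : ((m + 1 : Nat) : Int) = (m : Int) + 1),
        PySem.List.pyRange_one_succ_right (by omega), List.foldl_append, ih]
    simp only [List.foldl_cons, List.foldl_nil]
    rw [inner_fold_eq]
    apply List.map_congr_left
    intro c _
    unfold pickLightColSum
    rw [PySem.List.pyRange_one_succ_right (by omega : (0 : Int) ≤ (m : Int)),
        List.foldl_append]
    simp only [List.foldl_cons, List.foldl_nil]

-- B's accumulated table is exactly the list of A's column sums
theorem sums_eq (grid : List (List Int)) (rows cols : Int) :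
    (PySem.List.pyRange 0 rows 1).foldl
        (fun (sums : List Int) (r : Int) =>
          let row := PySem.List.pyGetD grid r []
          (PySem.List.pyRange 0 cols 1).foldl
            (fun sums c =>
              PySem.List.pySetD sums c (PySem.List.pyGetD sums c 0 + PySem.List.pyGetD row c 0))
            sums)
        (List.replicate cols.toNat 0)
      = (PySem.List.pyRange 0 cols 1).map (fun c => pickLightColSum grid rows c) := by
  by_cases h : rows ≤ 0
  · rw [PySem.List.pyRange_one_eq_nil (a := 0) (b := rows) h]
    simp only [List.foldl_nil]
    rw [show (fun c => pickLightColSum grid rows c) = (fun _ : Int => (0 : Int)) from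
          funext fun c => by
            unfold pickLightColSum
            rw [PySem.List.pyRange_one_eq_nil (a := 0) (b := rows) h]
            rfl,
        List.map_const']
    simp [PySem.List.length_pyRange_one]
  · have hN : ((rows.toNat : Nat) : Int) = rows := Int.toNat_of_nonneg (by omega)
    rw [← hN]
    exact outer_gen grid cols rows.toNat

-- ===== VERDICT (by name: the statement is the Claim_ definition above) =====
theorem pick_light_spec : Claim_equal_pick_light := by
  intro grid drop_power rows cols _ _
  show pick_light grid drop_power rows cols = pick_light_alt grid drop_power rows cols
  by_cases hc : cols ≤ 0
  · simp only [pick_light, pick_light_alt, if_pos hc]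
    rw [PySem.List.pyRange_one_eq_nil (a := 0) (b := cols) hc]
    rfl
  · have hsplit : cols = 1 + (((cols - 1).toNat : Nat) : Int) := by omega
    simp only [pick_light, pick_light_alt, if_neg hc]
    rw [sums_eq grid rows cols,
        PySem.List.pyRange_one_cons (by omega : (0 : Int) < cols)]
    simp only [List.map_cons, List.foldl_cons]
    rw [PySem.List.min?_id_cons]
    show (List.foldl _ ((0 : Int), some (pickLightColSum grid rows 0)) _).1 = _
    rw [afold_opt (fun c => pickLightColSum grid rows c)]
    simp only []
    rw [show (0 : Int) + 1 = 1 from rfl]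
    rw [hsplit, afold_fm (fun c => pickLightColSum grid rows c) (cols - 1).toNat 1 0
          (pickLightColSum grid rows 0)]
    rcases hfm : fm ((PySem.List.pyRange 1 (1 + ((cols - 1).toNat : Int)) 1).map
        (fun c => pickLightColSum grid rows c)) (pickLightColSum grid rows 0)
      with _ | ⟨⟨j, v⟩⟩
    · have h1 := (index_min_fm _ _).1 hfm
      rw [h1, PySem.List.index?_cons_self]
      rfl
    · obtain ⟨hv, hlt, hj, hidx⟩ := (index_min_fm _ _).2 j v hfm
      rw [← hv, PySem.List.index?_cons_of_ne _ (by omega : pickLightColSum grid rows 0 ≠ v),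
          hidx]
      simp only [Option.map_some, Option.getD_some]
      push_cast
      omega
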